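-- pv_equiv track=rewrite | github.com/ZihaoZhai/Recommendation_System | similarityRule.py | simpleColor_dict
-- ===== SOURCE A (Python) =====
-- def simpleColor_dict(colors):
--     simpleColor_dict = {}
--     uniqId = 0
--     for color in colors:
--         if color not in simpleColor_dict.keys() and color != None:
--             simpleColor_dict[color] = uniqId
--             uniqId += 1
--     return simpleColor_dict
-- ===== SOURCE B (Python) =====
-- def simpleColor_dict(colors):
--     distinct = set(c for c in colors if c != None)
--     ordered = sorted(distinct, key=colors.index)
--     return {c: i for i, c in enumerate(ordered)}
-- ===== Notes on version B (the rewrite author's own statement) =====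
-- stated objective: alternative
-- what changed: Instead of a single pass with a counter and an in-loop membership test, B collects the set of non-None colors and then sorts it by each color's first-occurrence position (list.index), assigning ids by enumerating the sorted list; correct because A's ids are exactly the rank of each distinct color's first occurrence.
import Mathlib
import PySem

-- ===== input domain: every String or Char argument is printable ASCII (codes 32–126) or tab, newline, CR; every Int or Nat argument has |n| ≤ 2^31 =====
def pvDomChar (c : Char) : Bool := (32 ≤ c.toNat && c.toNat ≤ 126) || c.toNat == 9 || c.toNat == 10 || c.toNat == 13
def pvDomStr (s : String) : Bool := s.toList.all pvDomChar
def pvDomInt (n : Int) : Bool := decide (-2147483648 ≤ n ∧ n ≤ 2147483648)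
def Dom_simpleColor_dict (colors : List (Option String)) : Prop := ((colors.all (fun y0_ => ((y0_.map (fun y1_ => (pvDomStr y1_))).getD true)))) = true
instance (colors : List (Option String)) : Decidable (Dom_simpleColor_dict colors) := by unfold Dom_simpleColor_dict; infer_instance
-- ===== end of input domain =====

-- B replaces A's counter-plus-membership single pass by: take the set of non-None colors,
-- sort it by first-occurrence position, enumerate; same return value ('alternative' objective).

-- ===== PORT A =====
-- loop: for color in colors: if color not in d.keys() and color != None: d[color] = uniqId; uniqId += 1
-- (the dict's keys are strings, so 'color not in keys and color != None' means: None is skipped,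
--  some c is added iff not already a key — ported by matching on the Option first, same tests)
def simpleColor_dict (colors : List (Option String)) : List (String × Int) :=
  (colors.foldl
    (fun (st : PySem.Dict String Int × Int) color =>
      match color with
      | none => st
      | some c => if !(st.1.contains c) then (st.1.insert c st.2, st.2 + 1) else st)
    (PySem.Dict.empty, 0)).1.items

-- ===== PORT B =====
-- distinct = set(c for c in colors if c != None); ordered = sorted(distinct, key=colors.index)
-- return {c: i for i, c in enumerate(ordered)}
-- (colors.index(c) searches for the element 'some c'; it would raise only if c were absent,
--  which cannot happen since c was drawn from colors — the .getD 0 default is never used)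
def simpleColor_dict_alt (colors : List (Option String)) : List (String × Int) :=
  (PySem.List.enumerate
    (PySem.List.sorted (PySem.Set.ofList (colors.filterMap (fun c => c)))
      (fun c => (PySem.List.index? colors (some c)).getD 0))
    0).map (fun p => (p.2, p.1))

-- ===== PRECONDITION & SPEC =====
def Spec_simpleColor_dict (colors : List (Option String)) (out : List (String × Int)) : Prop := out = simpleColor_dict_alt colors
instance (colors : List (Option String)) (out : List (String × Int)) : Decidable (Spec_simpleColor_dict colors out) := by unfold Spec_simpleColor_dict; infer_instance

-- ===== CLAIM (what is proved, stated in full; the proofs are below) =====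
def Claim_equal_simpleColor_dict : Prop := ∀ (colors : List (Option String)), Dom_simpleColor_dict colors → Spec_simpleColor_dict colors (simpleColor_dict colors)

-- ===== LEMMAS AND PROOFS =====

-- the dict A maintains after having seen the distinct strings L (in order)
def mkEnumDict (L : List String) : PySem.Dict String Int :=
  PySem.Dict.mk ((PySem.List.enumerate L 0).map (fun p => (p.2, p.1)))

lemma fst_map_swap_enumerate (L : List String) (s : Int) :
    List.map (fun x => x.1) (List.map (fun p => (p.2, p.1)) (PySem.List.enumerate L s)) = L := by
  induction L generalizing s with
  | nil => simp [PySem.List.enumerate_nil]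
  | cons x xs ih => simp [PySem.List.enumerate_cons, ih]

lemma contains_mkEnumDict (L : List String) (c : String) :
    (mkEnumDict L).contains c = L.contains c := by
  rw [PySem.Dict.contains_eq_decide_mem_keys]
  simp only [PySem.Dict.keys, mkEnumDict, fst_map_swap_enumerate]
  simp

lemma mkEnumDict_append (L : List String) (c : String) (h : L.contains c = false) :
    (mkEnumDict L).insert c (L.length : Int) = mkEnumDict (L ++ [c]) := by
  apply PySem.Dict.ext
  rw [PySem.Dict.items_insert_of_not_contains]
  · simp only [mkEnumDict, PySem.List.enumerate_append, PySem.List.enumerate_cons,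
      PySem.List.enumerate_nil, List.map_append]
    simp
  · rw [contains_mkEnumDict]; exact h

lemma invariant (colors : List (Option String)) :
    ∀ (L : List String),
      colors.foldl
        (fun (st : PySem.Dict String Int × Int) color =>
          match color with
          | none => st
          | some c => if !(st.1.contains c) then (st.1.insert c st.2, st.2 + 1) else st)
        (mkEnumDict L, (L.length : Int))
      = (mkEnumDict ((colors.filterMap (fun c => c)).foldl PySem.Set.add L),
         (((colors.filterMap (fun c => c)).foldl PySem.Set.add L).length : Int)) := by
  induction colors with
  | nil => intro L; simp
  | cons x xs ih =>
    intro L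
    match x with
    | none => simpa using ih L
    | some c =>
      by_cases hmem : c ∈ L
      · have hc : L.contains c = true := by simpa using hmem
        have hadd : PySem.Set.add L c = L := by
          simp [PySem.Set.add, PySem.Set.contains, hmem]
        simp only [List.foldl_cons, List.filterMap_cons, contains_mkEnumDict, hc,
          Bool.not_true, Bool.false_eq_true, if_false, hadd]
        exact ih L
      · have hc : L.contains c = false := by simpa using hmem
        have hadd : PySem.Set.add L c = L ++ [c] := by
          simp [PySem.Set.add, PySem.Set.contains, hmem]
        simp only [List.foldl_cons, List.filterMap_cons, contains_mkEnumDict, hc,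
          Bool.not_false, if_true, mkEnumDict_append L c hc, hadd]
        have := ih (L ++ [c])
        simpa using this

-- membership in filterMap id is membership of 'some _'
lemma mem_filterMap_id (colors : List (Option String)) (a : String) :
    a ∈ colors.filterMap (fun c => c) ↔ some a ∈ colors := by
  simp

-- first-occurrence index of a member of a set built from the list seen so far
lemma pairwise_index_ofList (colors : List (Option String)) :
    (PySem.Set.ofList (colors.filterMap (fun c => c))).Pairwise
      (fun a b => (PySem.List.index? colors (some a)).getD 0
                < (PySem.List.index? colors (some b)).getD 0) := by
  induction colors using List.reverseRecOn with
  | nil => simp [PySem.Set.ofList]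
  | append_singleton cs oc ih =>
    have hfm : (cs ++ [oc]).filterMap (fun c => c)
        = cs.filterMap (fun c => c) ++ oc.toList := by
      cases oc <;> simp
    have hidx_mem : ∀ a : String, some a ∈ cs →
        (PySem.List.index? (cs ++ [oc]) (some a)).getD 0
        = (PySem.List.index? cs (some a)).getD 0 := by
      intro a ha
      rw [PySem.List.index?_append_of_mem _ ha]
    cases oc with
    | none =>
      rw [hfm]
      simp only [Option.toList, List.append_nil]
      refine ih.imp_of_mem ?_
      intro a b ha hb h
      have ha' := (mem_filterMap_id cs a).1 ((PySem.Set.mem_ofList _ _).1 ha)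
      have hb' := (mem_filterMap_id cs b).1 ((PySem.Set.mem_ofList _ _).1 hb)
      rwa [hidx_mem a ha', hidx_mem b hb']
    | some x =>
      rw [hfm]
      simp only [Option.toList]
      rw [show PySem.Set.ofList (cs.filterMap (fun c => c) ++ [x])
            = PySem.Set.add (PySem.Set.ofList (cs.filterMap (fun c => c))) x by
        rw [PySem.Set.ofList_eq_foldl, PySem.Set.ofList_eq_foldl, List.foldl_append]
        simp]
      by_cases hx : x ∈ PySem.Set.ofList (cs.filterMap (fun c => c))
      · have hadd : PySem.Set.add (PySem.Set.ofList (cs.filterMap (fun c => c))) x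
            = PySem.Set.ofList (cs.filterMap (fun c => c)) := by
          simp [PySem.Set.add, PySem.Set.contains, hx]
        rw [hadd]
        refine ih.imp_of_mem ?_
        intro a b ha hb h
        have ha' := (mem_filterMap_id cs a).1 ((PySem.Set.mem_ofList _ _).1 ha)
        have hb' := (mem_filterMap_id cs b).1 ((PySem.Set.mem_ofList _ _).1 hb)
        rwa [hidx_mem a ha', hidx_mem b hb']
      · have hadd : PySem.Set.add (PySem.Set.ofList (cs.filterMap (fun c => c))) x
            = PySem.Set.ofList (cs.filterMap (fun c => c)) ++ [x] := by
          simp [PySem.Set.add, PySem.Set.contains, hx]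
        rw [hadd]
        have hxcs : some x ∉ cs := fun h =>
          hx ((PySem.Set.mem_ofList _ _).2 ((mem_filterMap_id cs x).2 h))
        have hxidx : (PySem.List.index? (cs ++ [some x]) (some x)).getD 0 = cs.length := by
          rw [PySem.List.index?_append_singleton_self cs (some x) hxcs]; rfl
        rw [List.pairwise_append]
        refine ⟨?_, by simp, ?_⟩
        · refine ih.imp_of_mem ?_
          intro a b ha hb h
          have ha' := (mem_filterMap_id cs a).1 ((PySem.Set.mem_ofList _ _).1 ha)
          have hb' := (mem_filterMap_id cs b).1 ((PySem.Set.mem_ofList _ _).1 hb)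
          rwa [hidx_mem a ha', hidx_mem b hb']
        · intro a ha b hb
          rw [List.mem_singleton] at hb
          subst hb
          have ha' := (mem_filterMap_id cs a).1 ((PySem.Set.mem_ofList _ _).1 ha)
          rw [hidx_mem a ha', hxidx]
          obtain ⟨k, hk⟩ := Option.isSome_iff_exists.1 ((PySem.List.index?_isSome_iff _ _).2 ha')
          obtain ⟨hlt, -, -⟩ := PySem.List.getElem_of_index?_eq_some hk
          rw [hk]
          simpa using hlt

-- the sorted set is exactly the first-occurrence-order list A builds
lemma sorted_eq_foldl (colors : List (Option String)) :
    PySem.List.sorted (PySem.Set.ofList (colors.filterMap (fun c => c)))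
      (fun c => (PySem.List.index? colors (some c)).getD 0) false
    = (colors.filterMap (fun c => c)).foldl PySem.Set.add [] := by
  rw [show (colors.filterMap (fun c => c)).foldl PySem.Set.add []
        = PySem.Set.ofList (colors.filterMap (fun c => c)) from
      (PySem.Set.ofList_eq_foldl _).symm]
  exact PySem.List.sorted_eq_of_perm_of_pairwise_lt _ _ _ (List.Perm.refl _)
    (pairwise_index_ofList colors)

-- ===== VERDICT (by name: the statement is the Claim_ definition above) =====
theorem simpleColor_dict_spec : Claim_equal_simpleColor_dict := by
  intro colors _
  show simpleColor_dict colors = simpleColor_dict_alt colors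
  unfold simpleColor_dict simpleColor_dict_alt
  have h0 : (PySem.Dict.empty : PySem.Dict String Int) = mkEnumDict [] := by
    apply PySem.Dict.ext; simp [mkEnumDict, PySem.List.enumerate_nil, PySem.Dict.empty]
  rw [h0]
  have := invariant colors []
  rw [show ((0 : Int) = (([] : List String).length : Int)) by simp] at *
  rw [this]
  rw [sorted_eq_foldl]
  rfl
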